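-- pv_equiv track=rewrite | github.com/theroyaritra/IITMadrasPythonCodeBase | PPA, GrPA and Assignment Codes/W12_PPA3.py | survival
-- ===== SOURCE A (Python) =====
-- def survival(T):
--     """
--     Determine if the organism will survive or not
--
--     Argument:
--         T: integer
--     Return:
--         result: bool
--     """
--     f=False
--     for x in range(6):
--         for y in range(6):
--             m=30+x**2+y**2-3*x-4*y
--             if(m<=T):
--                 f=True
--                 break
--     return f
-- ===== SOURCE B (Python) =====
-- def survival(T):
--     """
--     Determine if the organism will survive or not
--
--     Argument:
--         T: integer
--     Return:
--         result: bool
--     """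
--     # Closed form: min over x,y in 0..5 of 30+x^2+y^2-3x-4y is 24
--     # (x^2-3x minimised at x in {1,2} giving -2; y^2-4y at y=2 giving -4).
--     return T >= 24
-- ===== Notes on version B (the rewrite author's own statement) =====
-- stated objective: simpler
-- what changed: Replaced the 6x6 double loop over the grid with the closed-form observation that the grid's minimum value is 24, so the answer is just T >= 24.
import Mathlib
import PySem

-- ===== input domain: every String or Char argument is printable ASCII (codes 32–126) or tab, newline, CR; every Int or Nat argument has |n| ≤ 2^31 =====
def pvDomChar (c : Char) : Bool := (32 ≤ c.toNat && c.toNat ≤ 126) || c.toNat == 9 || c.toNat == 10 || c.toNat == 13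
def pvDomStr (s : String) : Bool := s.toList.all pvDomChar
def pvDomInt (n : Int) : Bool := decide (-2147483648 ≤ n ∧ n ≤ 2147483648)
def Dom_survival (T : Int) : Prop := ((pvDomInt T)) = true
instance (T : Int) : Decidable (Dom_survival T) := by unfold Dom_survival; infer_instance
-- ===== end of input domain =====

-- B replaces the 6x6 double loop with the closed form T >= 24 (the grid minimum), for simplicity.
-- ===== PORT A =====
-- inner 'for y in range(6)' with break: returns true on first m<=T, else falls through keeping f
def survivalInner (T x : Int) (ys : List Int) (f : Bool) : Bool :=
  match ys with
  | [] => f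
  | y :: rest =>
    if 30 + x ^ 2 + y ^ 2 - 3 * x - 4 * y ≤ T then true
    else survivalInner T x rest f

def survival (T : Int) : Bool :=
  (PySem.List.pyRange 0 6 1).foldl
    (fun f x => survivalInner T x (PySem.List.pyRange 0 6 1) f) false

-- ===== PORT B =====
-- B: closed form — the grid minimum is 24
def survival_alt (T : Int) : Bool := decide (T ≥ 24)

-- ===== PRECONDITION & SPEC =====
def Spec_survival (T : Int) (out : Bool) : Prop := out = survival_alt T
instance (T : Int) (out : Bool) : Decidable (Spec_survival T out) := by unfold Spec_survival; infer_instance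

-- ===== CLAIM (what is proved, stated in full; the proofs are below) =====
def Claim_equal_survival : Prop := ∀ (T : Int), Dom_survival T → Spec_survival T (survival T)

-- ===== LEMMAS AND PROOFS =====

-- ===== VERDICT (by name: the statement is the Claim_ definition above) =====
theorem survival_spec : Claim_equal_survival := by
  intro T _
  unfold Spec_survival
  have h : PySem.List.pyRange 0 6 1 = [0, 1, 2, 3, 4, 5] := by decide
  simp only [survival, survival_alt, h, List.foldl, survivalInner]
  by_cases h24 : (24 : Int) ≤ T
  · simp [h24]
  · have hm : ∀ m : Int, 24 ≤ m → decide (m ≤ T) = false :=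
      fun m hmle => decide_eq_false (by omega)
    simp [hm]
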